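-- pv_equiv track=rewrite | github.com/robocoppa/audrey_ai_2.0 | src/audrey/pipeline/deep_panel.py | _messages_for_subtask
-- ===== SOURCE A (Python) =====
-- from typing import Any
--
-- def _messages_for_subtask(base_messages: list[dict[str, Any]], subtask: str) -> list[dict[str, Any]]:
--     """Replace the last user message with the subtask question.
--
--     Keeps any prior system/assistant context intact so the worker still has
--     conversation history — only the focal question changes.
--     """
--     out: list[dict[str, Any]] = []
--     replaced = False
--     for m in reversed(base_messages):
--         if not replaced and m.get("role") == "user":
--             out.append({"role": "user", "content": subtask})
--             replaced = True
--         else: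
--             out.append(m)
--     out.reverse()
--     if not replaced:
--         out.append({"role": "user", "content": subtask})
--     return out
-- ===== SOURCE B (Python) =====
-- from typing import Any
--
-- def _messages_for_subtask(base_messages: list[dict[str, Any]], subtask: str) -> list[dict[str, Any]]:
--     """Find the index of the last user message, then splice the replacement in by slicing."""
--     new_msg = {"role": "user", "content": subtask}
--     idx = None
--     for i, m in enumerate(base_messages):
--         if m.get("role") == "user":
--             idx = i
--     if idx is None:
--         return base_messages + [new_msg]
--     return base_messages[:idx] + [new_msg] + base_messages[idx + 1:]
-- ===== Notes on version B (the rewrite author's own statement) =====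
-- stated objective: simpler
-- what changed: Replaces the reversed pass with a replaced-flag plus a final in-place reverse by a forward scan that records the last user-message index followed by a single slice-splice (prefix + new message + suffix).
import Mathlib
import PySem

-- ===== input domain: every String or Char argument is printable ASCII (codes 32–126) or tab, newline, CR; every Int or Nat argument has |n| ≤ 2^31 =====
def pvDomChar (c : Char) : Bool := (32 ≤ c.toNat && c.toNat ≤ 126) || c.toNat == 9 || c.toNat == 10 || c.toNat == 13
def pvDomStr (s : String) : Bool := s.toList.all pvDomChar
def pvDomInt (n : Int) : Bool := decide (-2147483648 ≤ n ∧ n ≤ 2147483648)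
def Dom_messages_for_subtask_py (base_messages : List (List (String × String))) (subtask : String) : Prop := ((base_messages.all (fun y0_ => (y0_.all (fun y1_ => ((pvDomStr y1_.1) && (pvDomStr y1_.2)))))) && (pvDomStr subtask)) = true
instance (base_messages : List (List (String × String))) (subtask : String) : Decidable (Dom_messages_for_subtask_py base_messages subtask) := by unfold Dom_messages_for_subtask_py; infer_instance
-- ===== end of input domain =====

-- B replaces A's reversed pass with a replaced-flag by a last-user-index scan followed by a slice-splice; objective: simpler.


-- ===== PORT A =====
-- the dict literal {"role": "user", "content": subtask}
def pvNewMsg (subtask : String) : List (String × String) := [("role", "user"), ("content", subtask)]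

-- loop body of A: 'if not replaced and m.get("role") == "user": out.append(new); replaced = True else: out.append(m)'
def pvAStep (subtask : String) (st : List (List (String × String)) × Bool) (m : List (String × String)) : List (List (String × String)) × Bool :=
  if !st.2 && ((PySem.Dict.mk m).get? "role" == some "user") then (st.1 ++ [pvNewMsg subtask], true)
  else (st.1 ++ [m], st.2)

def messages_for_subtask_py (base_messages : List (List (String × String))) (subtask : String) : List (List (String × String)) :=
  let st := base_messages.reverse.foldl (pvAStep subtask) ([], false)   -- for m in reversed(base_messages): …
  let out := st.1.reverse                                               -- out.reverse()
  if st.2 then out else out ++ [pvNewMsg subtask]                       -- if not replaced: out.append(new)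

-- ===== PORT B =====
-- 'for i, m in enumerate(base_messages): if m.get("role") == "user": idx = i'
def pvBIdx (base_messages : List (List (String × String))) : Option Int :=
  (PySem.List.enumerate base_messages).foldl
    (fun acc p => if (PySem.Dict.mk p.2).get? "role" == some "user" then some p.1 else acc) none

def messages_for_subtask_py_alt (base_messages : List (List (String × String))) (subtask : String) : List (List (String × String)) :=
  match pvBIdx base_messages with
  | none => base_messages ++ [[("role", "user"), ("content", subtask)]]
  | some i => PySem.List.slice base_messages none (some i)
      ++ [[("role", "user"), ("content", subtask)]]
      ++ PySem.List.slice base_messages (some (i + 1)) none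

-- ===== PRECONDITION & SPEC =====
def Spec_messages_for_subtask_py (base_messages : List (List (String × String))) (subtask : String) (out : List (List (String × String))) : Prop := out = messages_for_subtask_py_alt base_messages subtask
instance (base_messages : List (List (String × String))) (subtask : String) (out : List (List (String × String))) : Decidable (Spec_messages_for_subtask_py base_messages subtask out) := by unfold Spec_messages_for_subtask_py; infer_instance

-- ===== CLAIM (what is proved, stated in full; the proofs are below) =====
def Claim_equal_messages_for_subtask_py : Prop := ∀ (base_messages : List (List (String × String))) (subtask : String), Dom_messages_for_subtask_py base_messages subtask → Spec_messages_for_subtask_py base_messages subtask (messages_for_subtask_py base_messages subtask)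

-- ===== LEMMAS AND PROOFS =====

-- once the flag is set, A just copies the rest
lemma pvA_flag_true (subtask : String) (l : List (List (String × String))) (acc : List (List (String × String))) :
    l.foldl (pvAStep subtask) (acc, true) = (acc ++ l, true) := by
  induction l generalizing acc with
  | nil => simp
  | cons x l ih =>
    have hx : pvAStep subtask (acc, true) x = (acc ++ [x], true) := by simp [pvAStep]
    rw [List.foldl_cons, hx, ih]
    simp

-- the accumulator of A's loop only ever grows at the back
lemma pvA_prepend (subtask : String) (l : List (List (String × String))) (acc : List (List (String × String))) :
    l.foldl (pvAStep subtask) (acc, false)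
      = (acc ++ (l.foldl (pvAStep subtask) ([], false)).1, (l.foldl (pvAStep subtask) ([], false)).2) := by
  induction l generalizing acc with
  | nil => simp
  | cons x l ih =>
    by_cases h : ((PySem.Dict.mk x).get? "role" == some "user") = true
    · have hx : ∀ a : List (List (String × String)),
          pvAStep subtask (a, false) x = (a ++ [pvNewMsg subtask], true) := by
        intro a; simp [pvAStep, h]
      rw [List.foldl_cons, hx, List.foldl_cons, hx, pvA_flag_true, pvA_flag_true]
      simp
    · have hx : ∀ a : List (List (String × String)),
          pvAStep subtask (a, false) x = (a ++ [x], false) := by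
        intro a; simp [pvAStep, h]
      rw [List.foldl_cons, hx, List.foldl_cons, hx, ih]
      simp only [List.nil_append]
      rw [ih [x]]
      simp

lemma pvBIdx_append (xs : List (List (String × String))) (x : List (String × String)) :
    pvBIdx (xs ++ [x])
      = if (PySem.Dict.mk x).get? "role" == some "user" then some (xs.length : Int) else pvBIdx xs := by
  unfold pvBIdx
  rw [PySem.List.enumerate_append, List.foldl_append]
  simp [PySem.List.enumerate]

lemma pvBIdx_range (xs : List (List (String × String))) (i : Int) (h : pvBIdx xs = some i) :
    ∃ n : Nat, i = (n : Int) ∧ n < xs.length := by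
  induction xs using List.reverseRecOn with
  | nil => simp [pvBIdx, PySem.List.enumerate] at h
  | append_singleton xs x ih =>
    rw [pvBIdx_append] at h
    split at h
    · exact ⟨xs.length, by simpa using h.symm, by simp⟩
    · obtain ⟨n, rfl, hn⟩ := ih h
      exact ⟨n, rfl, by simp; omega⟩

-- the state of A's reversed loop, characterised by B's last-user index
lemma pvA_inv (subtask : String) (xs : List (List (String × String))) :
    xs.reverse.foldl (pvAStep subtask) ([], false)
      = match pvBIdx xs with
        | none => (xs.reverse, false)
        | some i => ((PySem.List.slice xs none (some i) ++ [pvNewMsg subtask]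
            ++ PySem.List.slice xs (some (i + 1)) none).reverse, true) := by
  induction xs using List.reverseRecOn with
  | nil => simp [pvBIdx, PySem.List.enumerate]
  | append_singleton xs x ih =>
    rw [List.reverse_append, pvBIdx_append]
    by_cases h : ((PySem.Dict.mk x).get? "role" == some "user") = true
    · rw [if_pos h]
      have hx : pvAStep subtask ([], false) x = ([pvNewMsg subtask], true) := by
        simp [pvAStep, h]
      simp only [List.reverse_singleton, List.singleton_append]
      rw [List.foldl_cons, hx, pvA_flag_true]
      have h1 : PySem.List.slice (xs ++ [x]) none (some (xs.length : Int)) = xs := by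
        rw [PySem.List.slice_to_natCast]; simp
      have h2 : PySem.List.slice (xs ++ [x]) (some ((xs.length : Int) + 1)) none = [] := by
        have e : ((xs.length : Int) + 1) = ((xs.length + 1 : Nat) : Int) := by push_cast; ring
        rw [e, PySem.List.slice_from_natCast]; simp
      rw [h1, h2]
      simp
    · rw [if_neg h]
      have hx : pvAStep subtask ([], false) x = ([x], false) := by simp [pvAStep, h]
      simp only [List.reverse_singleton, List.singleton_append]
      rw [List.foldl_cons, hx, pvA_prepend, ih]
      cases hB : pvBIdx xs with
      | none => simp
      | some i =>
        obtain ⟨n, rfl, hn⟩ := pvBIdx_range xs _ hB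
        have e1 : ((n : Int) + 1) = ((n + 1 : Nat) : Int) := by push_cast; ring
        simp only [e1, PySem.List.slice_to_natCast, PySem.List.slice_from_natCast]
        rw [List.take_append_of_le_length (by omega), List.drop_append_of_le_length (by omega)]
        simp

-- ===== VERDICT (by name: the statement is the Claim_ definition above) =====
theorem messages_for_subtask_py_spec : Claim_equal_messages_for_subtask_py := by
  intro bm subtask _
  unfold Spec_messages_for_subtask_py messages_for_subtask_py messages_for_subtask_py_alt
  rw [pvA_inv]
  cases hB : pvBIdx bm with
  | none => simp [pvNewMsg]
  | some i => simp [pvNewMsg]
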